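-- pv_equiv track=rewrite | github.com/trumanfromkorea/-Algorithm-Coding-Test | week_2/week2_2.py | solution
-- ===== SOURCE A (Python) =====
-- import math
--
-- def solution(answers):
--     answer = []
--
--     student_1 = [1,2,3,4,5]
--     student_2 = [2,1,2,3,2,4,2,5]
--     student_3 = [3,3,1,1,2,2,4,4,5,5]
--
--     dic = {1:0, 2:0, 3:0}
--
--     if len(answers) > len(student_1):
--         multi = math.ceil(len(answers)/len(student_1))
--         student_1 = student_1 * multi
--
--     if len(answers) > len(student_2):
--         multi = math.ceil(len(answers)/len(student_2))
--         student_2 = student_2 * multi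
--
--     if len(answers) > len(student_3):
--         multi = math.ceil(len(answers)/len(student_3))
--         student_3 = student_3 * multi
--
--     for a,b in zip(answers,student_1):
--         if a == b:
--             dic[1] += 1
--
--     for a,b in zip(answers,student_2):
--         if a == b:
--             dic[2] += 1
--
--     for a,b in zip(answers,student_3):
--         if a == b:
--             dic[3] += 1
--
--     answer = [k for k,v in dic.items() if max(dic.values()) == v]
--
--     return answer
-- ===== SOURCE B (Python) =====
-- def solution(answers):
--     p1 = [1, 2, 3, 4, 5]
--     p2 = [2, 1, 2, 3, 2, 4, 2, 5]
--     p3 = [3, 3, 1, 1, 2, 2, 4, 4, 5, 5]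
--     c1 = c2 = c3 = 0
--     for i, a in enumerate(answers):
--         if a == p1[i % 5]:
--             c1 += 1
--         if a == p2[i % 8]:
--             c2 += 1
--         if a == p3[i % 10]:
--             c3 += 1
--     m = max(c1, c2, c3)
--     return [s for s, c in ((1, c1), (2, c2), (3, c3)) if c == m]
-- ===== Notes on version B (the rewrite author's own statement) =====
-- stated objective: simpler
-- what changed: Instead of materialising replicated copies of the three answer patterns (math.ceil sizing, list multiplication, three zip passes), B makes one pass over enumerate(answers) indexing each base pattern cyclically with i % len, then picks the maximal counters directly.
import Mathlib
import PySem

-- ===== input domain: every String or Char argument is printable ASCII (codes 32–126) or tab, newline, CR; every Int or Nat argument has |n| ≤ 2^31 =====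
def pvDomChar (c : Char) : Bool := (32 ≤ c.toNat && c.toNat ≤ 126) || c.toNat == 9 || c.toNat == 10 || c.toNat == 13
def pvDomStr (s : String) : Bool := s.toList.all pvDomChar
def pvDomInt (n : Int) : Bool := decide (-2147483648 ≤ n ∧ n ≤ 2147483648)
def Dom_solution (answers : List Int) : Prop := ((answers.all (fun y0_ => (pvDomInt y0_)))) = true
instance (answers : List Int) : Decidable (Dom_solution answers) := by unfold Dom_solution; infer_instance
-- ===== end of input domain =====

-- B replaces A's replicated pattern lists (ceil-sized list multiplication + three zip passes)
-- by a single pass over enumerate(answers) with cyclic indexing i % len(pattern): simpler, O(1) extra space.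

-- ===== PORT A =====
-- the three base patterns (shared literals of both Pythons)
def pat1 : List Int := [1, 2, 3, 4, 5]
def pat2 : List Int := [2, 1, 2, 3, 2, 4, 2, 5]
def pat3 : List Int := [3, 3, 1, 1, 2, 2, 4, 4, 5, 5]

-- math.ceil(a/b) for the nonnegative ints that occur here (float division is exact at these sizes)
def pyCeilDiv (a b : Nat) : Nat := (a + b - 1) / b
-- Python `l * k`
def repList (l : List Int) (k : Nat) : List Int := (List.replicate k l).flatten
-- one `for a,b in zip(answers, student): if a == b: dic[j] += 1` loop (A has three identical ones)
def zipCount (ans pat : List Int) : Int :=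
  (ans.zip pat).foldl (fun c ab => if ab.1 = ab.2 then c + 1 else c) 0

-- the dict {1:0, 2:0, 3:0} has fixed literal keys updated in place; it is transliterated as the
-- three counters d1, d2, d3 kept in insertion order 1, 2, 3
def solution (answers : List Int) : List Int :=
  let s1 := if answers.length > pat1.length then repList pat1 (pyCeilDiv answers.length pat1.length) else pat1
  let s2 := if answers.length > pat2.length then repList pat2 (pyCeilDiv answers.length pat2.length) else pat2
  let s3 := if answers.length > pat3.length then repList pat3 (pyCeilDiv answers.length pat3.length) else pat3
  let d1 := zipCount answers s1
  let d2 := zipCount answers s2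
  let d3 := zipCount answers s3
  -- [k for k,v in dic.items() if max(dic.values()) == v]
  (([(1, d1), (2, d2), (3, d3)] : List (Int × Int)).filter
      (fun kv => PySem.List.max? [d1, d2, d3] id == some kv.2)).map Prod.fst

-- ===== PORT B =====
-- the pattern index i % len is always in range, so the pyGetD default 0 is never used
def solution_alt (answers : List Int) : List Int :=
  let c := (PySem.List.enumerate answers 0).foldl
    (fun (c : Int × Int × Int) ia =>
      ( if ia.2 = PySem.List.pyGetD pat1 (PySem.Int.mod ia.1 5) 0 then c.1 + 1 else c.1,
        if ia.2 = PySem.List.pyGetD pat2 (PySem.Int.mod ia.1 8) 0 then c.2.1 + 1 else c.2.1,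
        if ia.2 = PySem.List.pyGetD pat3 (PySem.Int.mod ia.1 10) 0 then c.2.2 + 1 else c.2.2 ))
    (0, 0, 0)
  let m := max c.1 (max c.2.1 c.2.2)
  (([(1, c.1), (2, c.2.1), (3, c.2.2)] : List (Int × Int)).filter (fun sc => sc.2 == m)).map Prod.fst

-- ===== PRECONDITION & SPEC =====
def Spec_solution (answers : List Int) (out : List Int) : Prop := out = solution_alt answers
instance (answers : List Int) (out : List Int) : Decidable (Spec_solution answers out) := by unfold Spec_solution; infer_instance

-- ===== CLAIM (what is proved, stated in full; the proofs are below) =====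
def Claim_equal_solution : Prop := ∀ (answers : List Int), Dom_solution answers → Spec_solution answers (solution answers)

-- ===== LEMMAS AND PROOFS =====

-- canonical cyclic match count both ports are reduced to
def cnt (p : List Int) : List Int → Nat → Int
  | [], _ => 0
  | a :: tl, i => (if a = p.getD (i % p.length) 0 then 1 else 0) + cnt p tl (i + 1)

lemma repList_length (l : List Int) (k : Nat) : (repList l k).length = k * l.length := by
  induction k with
  | zero => simp [repList]
  | succ k ih =>
      simp only [repList, List.replicate_succ, List.flatten_cons, List.length_append] at *
      rw [Nat.succ_mul]
      omega

lemma repList_getD (p : List Int) (k j : Nat) (hj : j < k * p.length) :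
    (repList p k).getD j 0 = p.getD (j % p.length) 0 := by
  induction k generalizing j with
  | zero => omega
  | succ k ih =>
      rw [Nat.succ_mul] at hj
      have hlen : 0 < p.length := by
        rcases Nat.eq_zero_or_pos p.length with h | h
        · rw [h, Nat.mul_zero] at hj; omega
        · exact h
      rw [repList, List.replicate_succ, List.flatten_cons]
      by_cases hlt : j < p.length
      · rw [List.getD_append _ _ _ _ hlt, Nat.mod_eq_of_lt hlt]
      · have hj' : j - p.length < k * p.length := by omega
        have := ih (j - p.length) hj'
        rw [List.getD_append_right p _ 0 j (by omega)]
        rw [repList] at this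
        rw [this]
        congr 1
        conv_rhs => rw [show j = p.length + (j - p.length) from by omega, Nat.add_mod_left]

lemma zipfold_eq_cnt (p : List Int) :
    ∀ (ans pat : List Int) (i : Nat) (c : Int),
      ans.length ≤ pat.length →
      (∀ j, j < ans.length → pat.getD j 0 = p.getD ((i + j) % p.length) 0) →
      (ans.zip pat).foldl (fun c ab => if ab.1 = ab.2 then c + 1 else c) c = c + cnt p ans i := by
  intro ans
  induction ans with
  | nil => intro pat i c _ _; simp [cnt]
  | cons a tl ih =>
      intro pat i c hlen hget
      cases pat with
      | nil => simp at hlen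
      | cons b pt =>
          have h0 := hget 0 (by simp)
          simp only [List.getD_cons_zero, Nat.add_zero] at h0
          have step : ∀ j, j < tl.length → pt.getD j 0 = p.getD (((i + 1) + j) % p.length) 0 := by
            intro j hj
            have := hget (j + 1) (by simp; omega)
            simpa [List.getD_cons_succ, Nat.add_assoc, Nat.add_comm 1 j] using this
          simp only [List.zip_cons_cons, List.foldl_cons, cnt, ← h0]
          rw [ih pt (i + 1) _ (by simpa using hlen) step]
          split_ifs <;> ring

lemma enumfold_eq_cnt :
    ∀ (ans : List Int) (i : Nat) (c1 c2 c3 : Int),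
      (PySem.List.enumerate ans (i : Int)).foldl
        (fun (c : Int × Int × Int) ia =>
          ( if ia.2 = PySem.List.pyGetD pat1 (PySem.Int.mod ia.1 5) 0 then c.1 + 1 else c.1,
            if ia.2 = PySem.List.pyGetD pat2 (PySem.Int.mod ia.1 8) 0 then c.2.1 + 1 else c.2.1,
            if ia.2 = PySem.List.pyGetD pat3 (PySem.Int.mod ia.1 10) 0 then c.2.2 + 1 else c.2.2 ))
        (c1, c2, c3)
      = (c1 + cnt pat1 ans i, c2 + cnt pat2 ans i, c3 + cnt pat3 ans i) := by
  intro ans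
  induction ans with
  | nil => intro i c1 c2 c3; simp [PySem.List.enumerate_nil, cnt]
  | cons a tl ih =>
      intro i c1 c2 c3
      rw [PySem.List.enumerate_cons]
      have e5 : PySem.Int.mod (i : Int) 5 = ((i % 5 : Nat) : Int) := by
        exact_mod_cast PySem.Int.mod_natCast i 5
      have e8 : PySem.Int.mod (i : Int) 8 = ((i % 8 : Nat) : Int) := by
        exact_mod_cast PySem.Int.mod_natCast i 8
      have e10 : PySem.Int.mod (i : Int) 10 = ((i % 10 : Nat) : Int) := by
        exact_mod_cast PySem.Int.mod_natCast i 10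
      have hi : ((i : Int) + 1) = ((i + 1 : Nat) : Int) := by push_cast; ring
      simp only [List.foldl_cons, e5, e8, e10, PySem.List.pyGetD_natCast, hi, ih]
      simp only [cnt]
      have l1 : pat1.length = 5 := by decide
      have l2 : pat2.length = 8 := by decide
      have l3 : pat3.length = 10 := by decide
      rw [l1, l2, l3]
      split_ifs <;> refine Prod.ext ?_ (Prod.ext ?_ ?_) <;> simp <;> ring

lemma max?_three (a b c : Int) : PySem.List.max? [a, b, c] id = some (max a (max b c)) := by
  simp only [PySem.List.max?, List.foldl, id]
  by_cases h1 : a < b <;> simp only [h1, if_true, if_false] <;>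
    by_cases h2 : b < c <;> by_cases h3 : a < c <;> simp [h2, h3, max_def] <;> omega

-- A's count against pattern j equals the canonical cyclic count, in both branches of the replication if
lemma zipCount_eq_cnt (ans p : List Int) (hp : 0 < p.length) :
    zipCount ans (if ans.length > p.length then repList p (pyCeilDiv ans.length p.length) else p)
      = cnt p ans 0 := by
  unfold zipCount
  by_cases h : ans.length > p.length
  · simp only [h, if_true]
    have hk : ans.length ≤ pyCeilDiv ans.length p.length * p.length := by
      unfold pyCeilDiv
      have h1 := Nat.div_add_mod (ans.length + p.length - 1) p.length
      have h2 : (ans.length + p.length - 1) / p.length * p.length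
          = p.length * ((ans.length + p.length - 1) / p.length) := Nat.mul_comm _ _
      have hm := Nat.mod_lt (ans.length + p.length - 1) hp
      omega
    rw [zipfold_eq_cnt p ans _ 0 0 (by rw [repList_length]; omega)
        (fun j hj => by simpa using repList_getD p _ j (by omega))]
    ring
  · simp only [h, if_false]
    rw [zipfold_eq_cnt p ans p 0 0 (by omega)
        (fun j hj => by rw [Nat.zero_add, Nat.mod_eq_of_lt (by omega)])]
    ring

lemma beq_flip (M v : Int) : (some M == some v) = (v == M) := by
  by_cases h : v = M
  · simp [h]
  · simp [h]
    omega

-- ===== VERDICT (by name: the statement is the Claim_ definition above) =====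
theorem solution_spec : Claim_equal_solution := by
  intro answers _
  have h1 := zipCount_eq_cnt answers pat1 (by decide)
  have h2 := zipCount_eq_cnt answers pat2 (by decide)
  have h3 := zipCount_eq_cnt answers pat3 (by decide)
  have hb := enumfold_eq_cnt answers 0 0 0 0
  simp only [Nat.cast_zero] at hb
  unfold Spec_solution solution solution_alt
  simp only [h1, h2, h3, hb, zero_add, max?_three, beq_flip]
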